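-- pv_equiv track=rewrite | github.com/CliMT/climt | climt/_core/properties.py | expand_wildcard_dim
-- ===== SOURCE A (Python) =====
-- def expand_wildcard_dim(dims_dict_with_wildcard, wildcard_dim_list):
--     return_dict = {}
--     for name, dims in dims_dict_with_wildcard.items():
--         if '*' in dims:
--             out_dims = list(dims)
--             i_wildcard = dims.index('*')
--             out_dims.pop(i_wildcard)
--             for wildcard_dim in reversed(wildcard_dim_list):
--                 out_dims.insert(i_wildcard, wildcard_dim)
--             return_dict[name] = tuple(out_dims)
--         else:
--             return_dict[name] = tuple(dims)
--     return return_dict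
-- ===== SOURCE B (Python) =====
-- def expand_wildcard_dim(dims_dict_with_wildcard, wildcard_dim_list):
--     def expand(dims):
--         out = []
--         it = iter(dims)
--         for x in it:
--             if x == '*':
--                 out.extend(wildcard_dim_list)
--                 out.extend(it)
--                 break
--             out.append(x)
--         return tuple(out)
--     return {name: expand(dims)
--             for name, dims in dims_dict_with_wildcard.items()}
-- ===== Notes on version B (the rewrite author's own statement) =====
-- stated objective: simpler
-- what changed: Replaces the find-index/pop/repeated-insert splice with one linear scan per dimension list that copies elements and, at the first '*', splices in wildcard_dim_list and copies the rest of the iterator.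
import Mathlib
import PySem

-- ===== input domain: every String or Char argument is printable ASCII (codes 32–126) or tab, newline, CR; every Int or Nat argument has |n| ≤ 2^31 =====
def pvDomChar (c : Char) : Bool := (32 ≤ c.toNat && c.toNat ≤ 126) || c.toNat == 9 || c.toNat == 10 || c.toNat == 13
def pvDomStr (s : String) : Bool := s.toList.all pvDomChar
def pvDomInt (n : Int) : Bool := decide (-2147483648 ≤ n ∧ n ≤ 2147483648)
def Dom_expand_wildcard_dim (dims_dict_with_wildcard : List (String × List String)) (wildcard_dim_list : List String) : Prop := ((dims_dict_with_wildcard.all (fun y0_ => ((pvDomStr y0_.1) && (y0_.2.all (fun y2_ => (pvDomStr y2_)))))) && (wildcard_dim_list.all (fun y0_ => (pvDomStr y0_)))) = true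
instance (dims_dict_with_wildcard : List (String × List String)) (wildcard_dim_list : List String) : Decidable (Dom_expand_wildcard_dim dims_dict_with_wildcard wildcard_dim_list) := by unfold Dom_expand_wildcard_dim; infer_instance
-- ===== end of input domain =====

-- B replaces A's find-index/pop/repeated-insert splice by a single structural scan
-- that copies elements and splices wildcard_dim_list in at the first '*' (objective: simpler).


-- ===== PORT A =====
def expand_wildcard_dim (dims_dict_with_wildcard : List (String × List String)) (wildcard_dim_list : List String) : List (String × List String) :=
  (dims_dict_with_wildcard.foldl (fun return_dict p =>
    let name := p.1
    let dims := p.2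
    if dims.contains "*" then
      match PySem.List.index? dims "*" with
      | some i_wildcard =>
          -- out_dims.pop(i_wildcard); index? = some guarantees the index is in range
          let out_dims := match PySem.List.pop? dims (i_wildcard : Int) with
            | some r => r.2
            | none => dims
          let out_dims := wildcard_dim_list.reverse.foldl
            (fun acc wd => PySem.List.insert acc (i_wildcard : Int) wd) out_dims
          return_dict.insert name out_dims
      | none => return_dict.insert name dims   -- unreachable: contains guard holds
    else
      return_dict.insert name dims) PySem.Dict.empty).items

-- ===== PORT B =====
-- single scan: copy until the first '*', splice wildcard list there, copy the rest
def pvExpandScan (wildcard_dim_list : List String) : List String → List String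
  | [] => []
  | x :: rest =>
      if x = "*" then wildcard_dim_list ++ rest
      else x :: pvExpandScan wildcard_dim_list rest

def expand_wildcard_dim_alt (dims_dict_with_wildcard : List (String × List String)) (wildcard_dim_list : List String) : List (String × List String) :=
  (dims_dict_with_wildcard.foldl (fun return_dict p =>
    return_dict.insert p.1 (pvExpandScan wildcard_dim_list p.2)) PySem.Dict.empty).items

-- ===== PRECONDITION & SPEC =====
def Spec_expand_wildcard_dim (dims_dict_with_wildcard : List (String × List String)) (wildcard_dim_list : List String) (out : List (String × List String)) : Prop := out = expand_wildcard_dim_alt dims_dict_with_wildcard wildcard_dim_list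
instance (dims_dict_with_wildcard : List (String × List String)) (wildcard_dim_list : List String) (out : List (String × List String)) : Decidable (Spec_expand_wildcard_dim dims_dict_with_wildcard wildcard_dim_list out) := by unfold Spec_expand_wildcard_dim; infer_instance

-- ===== CLAIM (what is proved, stated in full; the proofs are below) =====
def Claim_equal_expand_wildcard_dim : Prop := ∀ (dims_dict_with_wildcard : List (String × List String)) (wildcard_dim_list : List String), Dom_expand_wildcard_dim dims_dict_with_wildcard wildcard_dim_list → Spec_expand_wildcard_dim dims_dict_with_wildcard wildcard_dim_list (expand_wildcard_dim dims_dict_with_wildcard wildcard_dim_list)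

-- ===== LEMMAS AND PROOFS =====

lemma pvExpandScan_no_star (w : List String) (dims : List String) (h : "*" ∉ dims) :
    pvExpandScan w dims = dims := by
  induction dims with
  | nil => rfl
  | cons x rest ih =>
      simp only [List.mem_cons, not_or] at h
      simp [pvExpandScan, Ne.symm h.1, ih h.2]

lemma pvExpandScan_split (w : List String) (pre suf : List String) (h : "*" ∉ pre) :
    pvExpandScan w (pre ++ "*" :: suf) = pre ++ w ++ suf := by
  induction pre with
  | nil => simp [pvExpandScan]
  | cons x rest ih =>
      simp only [List.mem_cons, not_or] at h
      simp [pvExpandScan, Ne.symm h.1, ih h.2]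

lemma eraseIdx_mid (pre suf : List String) (x : String) :
    (pre ++ x :: suf).eraseIdx pre.length = pre ++ suf := by
  induction pre with
  | nil => rfl
  | cons y rest ih => simpa [List.eraseIdx] using ih

lemma insert_fold (w pre suf : List String) :
    w.reverse.foldl (fun acc wd => PySem.List.insert acc (pre.length : Int) wd) (pre ++ suf)
      = pre ++ w ++ suf := by
  induction w with
  | nil => simp
  | cons a w' ih =>
      have hle : pre.length ≤ (pre ++ w' ++ suf).length := by simp
      rw [List.reverse_cons, List.foldl_append, ih]
      simp only [List.foldl_cons, List.foldl_nil]
      rw [PySem.List.insert_natCast _ _ _ hle]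
      simp

-- per-entry value of A (when '*' occurs at index i) equals B's scan
lemma entry_some (w dims : List String) (i : Nat)
    (hi : PySem.List.index? dims "*" = some i) :
    w.reverse.foldl (fun acc wd => PySem.List.insert acc (i : Int) wd)
      (match PySem.List.pop? dims (i : Int) with
       | some r => r.2
       | none => dims) = pvExpandScan w dims := by
  obtain ⟨pre, suf, hsplit, hlen, hpre⟩ := (PySem.List.index?_eq_some_iff _ _ _).mp hi
  have hilt : i < dims.length := by subst hsplit; simp [← hlen]
  have hpop : PySem.List.pop? dims (i : Int) = some (dims[i], dims.eraseIdx i) :=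
    PySem.List.pop?_natCast dims i hilt
  have herase : dims.eraseIdx i = pre ++ suf := by
    subst hsplit; rw [← hlen]; exact eraseIdx_mid pre suf "*"
  simp only [hpop, herase]
  subst hsplit
  rw [← hlen, insert_fold w pre suf, pvExpandScan_split w pre suf hpre]

lemma fold_eq (w : List String) (d : List (String × List String))
    (rd : PySem.Dict String (List String)) :
    (d.foldl (fun return_dict p =>
      let name := p.1
      let dims := p.2
      if dims.contains "*" then
        match PySem.List.index? dims "*" with
        | some i_wildcard =>
            let out_dims := match PySem.List.pop? dims (i_wildcard : Int) with
              | some r => r.2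
              | none => dims
            let out_dims := w.reverse.foldl
              (fun acc wd => PySem.List.insert acc (i_wildcard : Int) wd) out_dims
            return_dict.insert name out_dims
        | none => return_dict.insert name dims
      else return_dict.insert name dims) rd)
    = d.foldl (fun return_dict p => return_dict.insert p.1 (pvExpandScan w p.2)) rd := by
  induction d generalizing rd with
  | nil => rfl
  | cons p rest ih =>
      simp only [List.foldl_cons]
      rw [ih]
      congr 1
      by_cases hc : p.2.contains "*" = true
      · rw [if_pos hc]
        have hm : "*" ∈ p.2 := by simpa using hc
        obtain ⟨i, hidx⟩ := Option.isSome_iff_exists.mp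
          ((PySem.List.index?_isSome_iff p.2 "*").mpr hm)
        simp only [hidx]
        rw [entry_some w p.2 i hidx]
      · rw [if_neg hc, pvExpandScan_no_star w p.2 (by simpa using hc)]

-- ===== VERDICT (by name: the statement is the Claim_ definition above) =====
theorem expand_wildcard_dim_spec : Claim_equal_expand_wildcard_dim := by
  intro d w _
  unfold Spec_expand_wildcard_dim expand_wildcard_dim expand_wildcard_dim_alt
  rw [fold_eq w d PySem.Dict.empty]
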